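-- pv_equiv track=rewrite | github.com/Rubal0990/GFG-DSA | Unequal Arrays - GFG/unequal-arrays.py | solve
-- ===== SOURCE A (Python) =====
-- from typing import List
--
-- def solve(n : int, a : List[int], b : List[int]) -> int:
--     sm, ans, cnt = 0, -1, 0
--     odd, even = [], []
--     a.sort()
--     b.sort()
--
--     for i in range(n):
--         if b[i] & 1:
--             odd.append(b[i])
--         else:
--             even.append(b[i])
--
--     x = len(odd) - 1
--     y = len(even) - 1
--
--     for i in range(n-1, -1, -1):
--         if a[i] & 1:
--             if x < 0:
--                 return ans
--
--             sm += (a[i] - odd[x]) // 2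
--             cnt += max(0, (a[i] - odd[x]) // 2)
--             x -= 1
--
--         else:
--             if y < 0:
--                 return ans
--
--             sm += (a[i] - even[y]) // 2
--             cnt += max(0, (a[i] - even[y]) // 2)
--             y -= 1
--
--     if sm != 0:
--         return ans
--
--     return cnt
-- ===== SOURCE B (Python) =====
-- from typing import List
--
-- def solve(n: int, a: List[int], b: List[int]) -> int:
--     # Like the original, sorts a and b in place; the equivalence is about the return value.
--     a.sort()
--     b.sort()
--     k = n if n > 0 else 0
--     pa, pb = a[:k], b[:k]
--     diff = 0   # sum of matched a-elements minus sum of matched b-elements (= 2 * A's sm)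
--     area = 0   # sum of the positive parts of the matched differences (= 2 * A's cnt)
--     for p in (1, 0):
--         xs = [v for v in pa if v % 2 == p]
--         ys = [v for v in pb if v % 2 == p]
--         if len(xs) > len(ys):
--             return -1
--         ys = ys[len(ys) - len(xs):]
--         diff += sum(xs) - sum(ys)
--         area += _pos_area(xs, ys)
--     if diff != 0:
--         return -1
--     return area // 2
--
-- def _pos_area(xs, ys):
--     # For two equally long ascending lists, the sum of max(0, x - y) over the rank
--     # pairing equals the area where ys's CDF exceeds xs's CDF: one sweep over the
--     # merged values with a running counter, no pairs ever formed.
--     events = sorted([(v, -1) for v in xs] + [(v, 1) for v in ys], key=lambda e: e[0])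
--     total = 0
--     c = 0
--     prev = None
--     for v, d in events:
--         if prev is not None and c > 0:
--             total += c * (v - prev)
--         c += d
--         prev = v
--     return total
-- ===== Notes on version B (the rewrite author's own statement) =====
-- stated objective: alternative
-- what changed: B never forms or accumulates per-pair differences: the -1 feasibility is a per-parity length comparison, the zero-sum condition is checked on plain sums of the matched sublists, and the count is computed by a CDF sweep over the merged tagged values (running-counter area), i.e. a Wasserstein-style sweep instead of A's pointer-driven pairing loops.
import Mathlib
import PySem

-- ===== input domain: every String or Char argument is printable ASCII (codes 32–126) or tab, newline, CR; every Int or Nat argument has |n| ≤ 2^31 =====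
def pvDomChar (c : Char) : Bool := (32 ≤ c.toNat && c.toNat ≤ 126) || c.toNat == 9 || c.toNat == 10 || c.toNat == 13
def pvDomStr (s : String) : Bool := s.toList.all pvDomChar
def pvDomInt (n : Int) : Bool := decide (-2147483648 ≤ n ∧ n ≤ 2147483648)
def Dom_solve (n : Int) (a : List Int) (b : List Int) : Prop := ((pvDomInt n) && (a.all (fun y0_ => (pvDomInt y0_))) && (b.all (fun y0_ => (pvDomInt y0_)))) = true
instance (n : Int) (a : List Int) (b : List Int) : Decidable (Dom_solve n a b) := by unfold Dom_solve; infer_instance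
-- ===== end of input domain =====

-- B replaces A's per-pair accumulation entirely: the -1 feasibility is a length check, the
-- zero-sum condition is checked on plain sums, and the answer is computed pair-free by a
-- CDF sweep over the merged values (alternative algorithm, same cost); like A it concerns
-- only the return value — both Python versions sort a and b in place.


-- ===== PORT A =====
-- second loop of A: for i in range(n-1,-1,-1), with pointers x y and early returns
def solveLoop (a' odd even : List Int) : List Int → Int → Int → Int → Int → Int
  | [], _, _, sm, cnt => if sm ≠ 0 then -1 else cnt
  | i :: rest, x, y, sm, cnt =>
    let ai := PySem.List.pyGetD a' i 0
    if PySem.Int.band ai 1 ≠ 0 then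
      if x < 0 then -1
      else
        let d := PySem.Int.floordiv (ai - PySem.List.pyGetD odd x 0) 2
        solveLoop a' odd even rest (x - 1) y (sm + d) (cnt + max 0 d)
    else
      if y < 0 then -1
      else
        let d := PySem.Int.floordiv (ai - PySem.List.pyGetD even y 0) 2
        solveLoop a' odd even rest x (y - 1) (sm + d) (cnt + max 0 d)

def solve (n : Int) (a : List Int) (b : List Int) : Int :=
  let a' := PySem.List.sorted a (fun v => v) false
  let b' := PySem.List.sorted b (fun v => v) false
  -- first loop: split b'[0:n] into odd / even by appending
  let oe := (PySem.List.pyRange 0 n 1).foldl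
    (fun (p : List Int × List Int) i =>
      let bi := PySem.List.pyGetD b' i 0
      if PySem.Int.band bi 1 ≠ 0 then (p.1 ++ [bi], p.2) else (p.1, p.2 ++ [bi])) ([], [])
  solveLoop a' oe.1 oe.2 (PySem.List.pyRange (n - 1) (-1) (-1))
    ((oe.1.length : Int) - 1) ((oe.2.length : Int) - 1) 0 0

-- ===== PORT B =====
-- the sweep of _pos_area after its first iteration (prev = value of the last seen event)
def posAreaSweep : List (Int × Int) → Int → Int → Int → Int
  | [], _, _, total => total
  | (v, d) :: rest, prev, c, total =>
      posAreaSweep rest v (c + d) (total + (if c > 0 then c * (v - prev) else 0))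

-- _pos_area: merge the tagged values, sweep once with a running counter
def posArea (xs ys : List Int) : Int :=
  let events := PySem.List.sorted
    (xs.map (fun v => (v, (-1 : Int))) ++ ys.map (fun v => (v, (1 : Int)))) (fun e => e.1) false
  match events with
  | [] => 0
  | (v, d) :: rest => posAreaSweep rest v d 0

-- the body of B's for-p-in-(1,0) loop, unrolled (two iterations, early return -1)
def solve_alt (n : Int) (a : List Int) (b : List Int) : Int :=
  let a' := PySem.List.sorted a (fun v => v) false
  let b' := PySem.List.sorted b (fun v => v) false
  let k := if 0 < n then n else 0
  let pa := PySem.List.slice a' none (some k)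
  let pb := PySem.List.slice b' none (some k)
  let xs1 := pa.filter (fun v => decide (PySem.Int.mod v 2 = 1))
  let ys1 := pb.filter (fun v => decide (PySem.Int.mod v 2 = 1))
  if xs1.length > ys1.length then -1
  else
    let ys1' := PySem.List.slice ys1 (some ((ys1.length : Int) - (xs1.length : Int))) none
    let xs0 := pa.filter (fun v => decide (PySem.Int.mod v 2 = 0))
    let ys0 := pb.filter (fun v => decide (PySem.Int.mod v 2 = 0))
    if xs0.length > ys0.length then -1
    else
      let ys0' := PySem.List.slice ys0 (some ((ys0.length : Int) - (xs0.length : Int))) none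
      let diff := (xs1.sum - ys1'.sum) + (xs0.sum - ys0'.sum)
      let area := posArea xs1 ys1' + posArea xs0 ys0'
      if diff ≠ 0 then -1 else PySem.Int.floordiv area 2

-- ===== PRECONDITION & SPEC =====
-- Pre_ excludes exactly the inputs on which A raises IndexError (n larger than a list).
def Pre_solve (n : Int) (a : List Int) (b : List Int) : Prop :=
  n ≤ (a.length : Int) ∧ n ≤ (b.length : Int)
instance (n : Int) (a : List Int) (b : List Int) : Decidable (Pre_solve n a b) := by unfold Pre_solve; infer_instance
def pvWitness_solve : Int × List Int × List Int := (3, [1, 4, 3], [2, 3, 5])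

def Spec_solve (n : Int) (a : List Int) (b : List Int) (out : Int) : Prop := out = solve_alt n a b
instance (n : Int) (a : List Int) (b : List Int) (out : Int) : Decidable (Spec_solve n a b out) := by unfold Spec_solve; infer_instance

-- ===== CLAIM (what is proved, stated in full; the proofs are below) =====
def Claim_equal_solve : Prop := ∀ (n : Int) (a : List Int) (b : List Int), Dom_solve n a b → Pre_solve n a b → Spec_solve n a b (solve n a b)

-- ===== LEMMAS AND PROOFS =====

-- ---------- A-side: from the pointer loops to a closed pair form ----------

-- parity test: a & 1 is truthy iff a % 2 ≠ 0
lemma band_one_ne_zero_iff (v : Int) : PySem.Int.band v 1 ≠ 0 ↔ PySem.Int.mod v 2 ≠ 0 := by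
  rw [PySem.Int.band_one]

-- the values A's index loops read are exactly the take-n prefix of the list
lemma map_getD_pyRange_take (xs : List Int) (n : Int) (h : n ≤ (xs.length : Int)) :
    (PySem.List.pyRange 0 n 1).map (fun i => PySem.List.pyGetD xs i 0) = xs.take n.toNat := by
  apply List.ext_getElem
  · simp [PySem.List.length_pyRange_one]
    omega
  · intro k h1 h2
    simp only [List.getElem_map, PySem.List.getElem_pyRange_one, List.getElem_take]
    have hk : k < xs.length := by
      simp [PySem.List.length_pyRange_one] at h1; omega
    rw [show (0 : Int) + (k : Int) = ((k : Nat) : Int) by omega]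
    rw [PySem.List.pyGetD_natCast]
    exact List.getD_eq_getElem xs 0 hk

-- A's first loop: splitting by parity with appends is a pair of filters
lemma split_fold (xs : List Int) (o e : List Int) :
    xs.foldl (fun (p : List Int × List Int) v =>
        if PySem.Int.band v 1 ≠ 0 then (p.1 ++ [v], p.2) else (p.1, p.2 ++ [v])) (o, e)
      = (o ++ xs.filter (fun v => decide (PySem.Int.mod v 2 ≠ 0)),
         e ++ xs.filter (fun v => decide (PySem.Int.mod v 2 = 0))) := by
  induction xs generalizing o e with
  | nil => simp
  | cons v t ih =>
    simp only [List.foldl_cons]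
    by_cases hv : PySem.Int.band v 1 ≠ 0
    · have hm : PySem.Int.mod v 2 ≠ 0 := (band_one_ne_zero_iff v).mp hv
      have h1 : (decide (PySem.Int.mod v 2 ≠ 0)) = true := by simpa using hm
      have h2 : (decide (PySem.Int.mod v 2 = 0)) = false := by simpa using hm
      rw [if_pos hv, ih, List.filter_cons, List.filter_cons, h1, h2]
      simp only [if_true, if_false, Bool.false_eq_true, List.append_assoc, List.singleton_append]
    · have hm : PySem.Int.mod v 2 = 0 := by
        by_contra hc; exact hv ((band_one_ne_zero_iff v).mpr hc)
      have h1 : (decide (PySem.Int.mod v 2 ≠ 0)) = false := by simpa using hm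
      have h2 : (decide (PySem.Int.mod v 2 = 0)) = true := by simpa using hm
      rw [if_neg hv, ih, List.filter_cons, List.filter_cons, h1, h2]
      simp only [if_true, if_false, Bool.false_eq_true, List.append_assoc, List.singleton_append]

-- foldl with a value lookup per index = the same loop over the listed values
def loopVals (odd even : List Int) : List Int → Int → Int → Int → Int → Int
  | [], _, _, sm, cnt => if sm ≠ 0 then -1 else cnt
  | v :: rest, x, y, sm, cnt =>
    if PySem.Int.band v 1 ≠ 0 then
      if x < 0 then -1
      else
        let d := PySem.Int.floordiv (v - PySem.List.pyGetD odd x 0) 2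
        loopVals odd even rest (x - 1) y (sm + d) (cnt + max 0 d)
    else
      if y < 0 then -1
      else
        let d := PySem.Int.floordiv (v - PySem.List.pyGetD even y 0) 2
        loopVals odd even rest x (y - 1) (sm + d) (cnt + max 0 d)

lemma solveLoop_eq_loopVals (a' odd even : List Int) (idxs : List Int) :
    ∀ x y sm cnt, solveLoop a' odd even idxs x y sm cnt
      = loopVals odd even (idxs.map (fun i => PySem.List.pyGetD a' i 0)) x y sm cnt := by
  induction idxs with
  | nil => intro x y sm cnt; rfl
  | cons i t ih =>
    intro x y sm cnt
    simp only [List.map_cons, solveLoop, loopVals]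
    split_ifs <;> simp [ih]

-- pointer form = list-consumption form: available elements are take (x+1), reversed
def recD (p : Int → Bool) : List Int → List Int → List Int → Int → Int → Int
  | [], _, _, sm, cnt => if sm ≠ 0 then -1 else cnt
  | v :: ra, od, ev, sm, cnt =>
    if p v then
      match od with
      | [] => -1
      | o :: od' =>
        let d := PySem.Int.floordiv (v - o) 2
        recD p ra od' ev (sm + d) (cnt + max 0 d)
    else
      match ev with
      | [] => -1
      | e :: ev' =>
        let d := PySem.Int.floordiv (v - e) 2
        recD p ra od ev' (sm + d) (cnt + max 0 d)

lemma take_succ_reverse (l : List Int) (x : Int) (hx : 0 ≤ x) (hlt : x < (l.length : Int)) :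
    (l.take (x + 1).toNat).reverse = l[x.toNat]'(by omega) :: (l.take x.toNat).reverse := by
  have h1 : (x + 1).toNat = x.toNat + 1 := by omega
  have h2 : x.toNat < l.length := by omega
  rw [h1, List.take_succ, List.getElem?_eq_getElem h2]
  simp

lemma loopVals_eq_recD (odd even : List Int) (ra : List Int) :
    ∀ x y sm cnt, x < (odd.length : Int) → y < (even.length : Int) →
    loopVals odd even ra x y sm cnt
      = recD (fun v => decide (PySem.Int.band v 1 ≠ 0)) ra
          ((odd.take (x + 1).toNat).reverse) ((even.take (y + 1).toNat).reverse) sm cnt := by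
  induction ra with
  | nil => intro x y sm cnt _ _; rfl
  | cons v t ih =>
    intro x y sm cnt hx hy
    simp only [loopVals, recD]
    by_cases hv : PySem.Int.band v 1 ≠ 0
    · have hd : decide (PySem.Int.band v 1 ≠ 0) = true := by simpa using hv
      rw [if_pos hv, if_pos hd]
      by_cases hx0 : x < 0
      · have h0 : (x + 1).toNat = 0 := by omega
        rw [if_pos hx0, h0]
        rfl
      · have hx0' : 0 ≤ x := by omega
        rw [if_neg hx0, take_succ_reverse odd x hx0' hx,
            PySem.List.pyGetD_eq_getElem odd 0 hx0' hx]
        rw [ih (x - 1) y _ _ (by omega) hy]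
        have hxx : x - 1 + 1 = x := by ring
        rw [hxx]
    · have hd : ¬ (decide (PySem.Int.band v 1 ≠ 0) = true) := by simpa using hv
      rw [if_neg hv, if_neg hd]
      by_cases hy0 : y < 0
      · have h0 : (y + 1).toNat = 0 := by omega
        rw [if_pos hy0, h0]
        rfl
      · have hy0' : 0 ≤ y := by omega
        rw [if_neg hy0, take_succ_reverse even y hy0' hy,
            PySem.List.pyGetD_eq_getElem even 0 hy0' hy]
        rw [ih x (y - 1) _ _ hx (by omega)]
        have hyy : y - 1 + 1 = y := by ring
        rw [hyy]

-- per-pair step of the closed pair form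
def altStep (s : Int × Int) (p : Int × Int) : Int × Int :=
  let d := PySem.Int.floordiv (p.1 - p.2) 2
  (s.1 + d, s.2 + max 0 d)

-- closed form of recD: length check up front, then one fold over the zipped pairs
lemma recD_closed (p : Int → Bool) (ra : List Int) :
    ∀ od ev sm cnt,
    recD p ra od ev sm cnt
      = if (ra.filter p).length > od.length ∨ (ra.filter (fun v => !p v)).length > ev.length then -1
        else
          let s := (((ra.filter p).zip od) ++ ((ra.filter (fun v => !p v)).zip ev)).foldl altStep (sm, cnt)
          if s.1 = 0 then s.2 else -1 := by
  induction ra with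
  | nil =>
    intro od ev sm cnt
    simp only [recD, List.filter_nil, List.zip_nil_left, List.nil_append, List.foldl_nil,
      List.length_nil]
    have h : ¬ (0 > od.length ∨ 0 > ev.length) := by omega
    rw [if_neg h]
    by_cases hs : sm = 0
    · simp [hs]
    · simp [hs]
  | cons v t ih =>
    intro od ev sm cnt
    by_cases hv : p v
    · rcases od with _ | ⟨o, od'⟩
      · simp [recD, hv]
      · simp only [recD, hv, if_true, List.filter_cons, Bool.not_true, if_false,
          Bool.false_eq_true, List.length_cons]
        rw [ih]
        simp only [List.zip_cons_cons, List.cons_append, List.foldl_cons]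
        have hstep : altStep (sm, cnt) (v, o)
            = (sm + PySem.Int.floordiv (v - o) 2, cnt + max 0 (PySem.Int.floordiv (v - o) 2)) := rfl
        rw [hstep]
        congr 1
        simp only [eq_iff_iff]
        omega
    · rcases ev with _ | ⟨e, ev'⟩
      · simp [recD, hv]
      · simp only [recD, hv, if_false, List.filter_cons, Bool.not_false, if_true,
          Bool.false_eq_true, List.length_cons]
        rw [ih]
        simp only [List.zip_cons_cons]
        have hstep : ∀ s : Int × Int, altStep s (v, e)
            = (s.1 + PySem.Int.floordiv (v - e) 2, s.2 + max 0 (PySem.Int.floordiv (v - e) 2)) :=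
          fun s => rfl
        by_cases hc : (t.filter p).length > od.length ∨ (t.filter (fun v => !p v)).length > ev'.length
        · rw [if_pos hc]
          rcases hc with h | h
          · rw [if_pos (Or.inl h)]
          · rw [if_pos (Or.inr (Nat.succ_lt_succ h))]
        · rw [if_neg hc]
          have hc2 : ¬ ((t.filter p).length > od.length ∨
              (t.filter (fun v => !p v)).length + 1 > ev'.length + 1) := by
            intro hcon
            apply hc
            rcases hcon with h | h
            · exact Or.inl h
            · exact Or.inr (Nat.lt_of_succ_lt_succ h)
          rw [if_neg hc2]
          rw [List.foldl_append, List.foldl_append, List.foldl_cons]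
          generalize (t.filter p).zip od = L1
          have comm : ∀ (L : List (Int × Int)) (s q : Int × Int),
              L.foldl altStep (altStep s q) = altStep (L.foldl altStep s) q := by
            intro L
            induction L with
            | nil => intro s q; rfl
            | cons h tl iht =>
              intro s q
              simp only [List.foldl_cons]
              rw [show altStep (altStep s q) h = altStep (altStep s h) q from by
                simp only [altStep, Prod.mk.injEq]; constructor <;> ring]
              exact iht (altStep s h) q
          rw [← comm L1 (sm, cnt) (v, e), hstep]

-- predicate bridges between A's tests and B's tests
lemma pred_eq : (fun v => decide (PySem.Int.band v 1 ≠ 0)) = (fun v => decide (PySem.Int.mod v 2 = 1)) := by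
  funext v
  rw [PySem.Int.band_one]
  simp

lemma not_pred_eq : (fun v => !decide (PySem.Int.band v 1 ≠ 0)) = (fun v => decide (PySem.Int.mod v 2 = 0)) := by
  funext v
  rw [PySem.Int.band_one]
  rcases Int.emod_two_eq v with h | h
  · simp [PySem.Int.mod_eq_emod_of_pos (show (0:Int) < 2 by norm_num), h]
  · simp [PySem.Int.mod_eq_emod_of_pos (show (0:Int) < 2 by norm_num), h]

-- ---------- pair-fold to sums ----------

def dpair (e : Int × Int) : Int := PySem.Int.floordiv (e.1 - e.2) 2

lemma foldl_altStep_sum (L : List (Int × Int)) :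
    ∀ s : Int × Int, L.foldl altStep s
      = (s.1 + (L.map dpair).sum, s.2 + (L.map (fun e => max 0 (dpair e))).sum) := by
  induction L with
  | nil => intro s; simp
  | cons e t ih =>
    intro s
    simp only [List.foldl_cons, List.map_cons, List.sum_cons]
    rw [show altStep s e = (s.1 + dpair e, s.2 + max 0 (dpair e)) from rfl, ih]
    simp only [Prod.mk.injEq]
    constructor <;> ring

-- ---------- threshold ("CDF") machinery ----------

def cdfI (l : List Int) (t : Int) : Int := ((l.filter (fun v => decide (v ≤ t))).length : Int)

lemma cdfI_nonneg (l : List Int) (t : Int) : 0 ≤ cdfI l t := Int.natCast_nonneg _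

lemma cdfI_eq_zero (l : List Int) (t : Int) (h : ∀ v ∈ l, t < v) : cdfI l t = 0 := by
  unfold cdfI
  rw [List.filter_eq_nil_iff.mpr]
  · rfl
  · intro v hv
    simp only [decide_eq_true_eq]
    exact not_le.mpr (h v hv)

lemma cdfI_eq_length (l : List Int) (t : Int) (h : ∀ v ∈ l, v ≤ t) : cdfI l t = l.length := by
  unfold cdfI
  rw [List.filter_eq_self.mpr]
  intro v hv
  exact decide_eq_true (h v hv)

lemma cdfI_cons (x : Int) (l : List Int) (t : Int) :
    cdfI (x :: l) t = (if x ≤ t then 1 else 0) + cdfI l t := by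
  unfold cdfI
  rw [List.filter_cons]
  by_cases h : x ≤ t <;> simp [h] <;> omega

-- sum over Ico of an indicator of a subinterval
lemma sum_indicator_Ico (lo hi y x : Int) (h1 : lo ≤ y) (h2 : x ≤ hi) :
    (∑ t ∈ Finset.Ico lo hi, (if y ≤ t ∧ t < x then (1 : Int) else 0)) = max 0 (x - y) := by
  rw [← Finset.sum_filter]
  have hfil : (Finset.Ico lo hi).filter (fun t => y ≤ t ∧ t < x) = Finset.Ico y x := by
    apply Finset.ext
    intro t
    simp only [Finset.mem_filter, Finset.mem_Ico]
    omega
  rw [hfil]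
  simp only [Finset.sum_const, Int.card_Ico, nsmul_eq_mul, mul_one]
  omega

-- splitting an Ico sum at an intermediate point
lemma sum_Ico_split (f : Int → Int) (a b c : Int) (h1 : a ≤ b) (h2 : b ≤ c) :
    (∑ t ∈ Finset.Ico a b, f t) + (∑ t ∈ Finset.Ico b c, f t) = ∑ t ∈ Finset.Ico a c, f t := by
  rw [← Finset.Ico_union_Ico_eq_Ico h1 h2,
      Finset.sum_union (Finset.Ico_disjoint_Ico_consecutive a b c)]

-- rank-paired positive parts as a threshold sum (the mathematical heart of B)
lemma pairSum_eq_threshold (xs ys : List Int) (lo hi : Int) :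
    xs.length = ys.length →
    xs.Pairwise (· ≤ ·) → ys.Pairwise (· ≤ ·) →
    (∀ v ∈ xs, lo ≤ v ∧ v < hi) → (∀ v ∈ ys, lo ≤ v ∧ v < hi) →
    ((xs.zip ys).map (fun e => max 0 (e.1 - e.2))).sum
      = ∑ t ∈ Finset.Ico lo hi, max 0 (cdfI ys t - cdfI xs t) := by
  induction xs generalizing ys with
  | nil =>
    intro hlen _ _ _ _
    have hy : ys = [] := List.eq_nil_of_length_eq_zero hlen.symm
    subst hy
    simp [cdfI]
  | cons x xs' ih =>
    intro hlen hsx hsy hbx hby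
    obtain ⟨y, ys', rfl⟩ : ∃ y ys', ys = y :: ys' := by
      cases ys with
      | nil => simp at hlen
      | cons y ys' => exact ⟨y, ys', rfl⟩
    have hxs' : ∀ v ∈ xs', x ≤ v := (List.pairwise_cons.mp hsx).1
    have hys' : ∀ v ∈ ys', y ≤ v := (List.pairwise_cons.mp hsy).1
    have hpt : ∀ t, max 0 (cdfI (y :: ys') t - cdfI (x :: xs') t)
        = max 0 (cdfI ys' t - cdfI xs' t) + (if y ≤ t ∧ t < x then 1 else 0) := by
      intro t
      rw [cdfI_cons, cdfI_cons]
      have hnx := cdfI_nonneg xs' t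
      have hny := cdfI_nonneg ys' t
      by_cases hx : x ≤ t <;> by_cases hy : y ≤ t
      · simp only [hx, hy, if_true, true_and]
        split_ifs <;> omega
      · have h0 : cdfI ys' t = 0 := cdfI_eq_zero _ _ (fun v hv => lt_of_lt_of_le (by omega) (hys' v hv))
        simp only [hx, hy, if_true, if_false, false_and]
        omega
      · have h0 : cdfI xs' t = 0 := cdfI_eq_zero _ _ (fun v hv => lt_of_lt_of_le (by omega) (hxs' v hv))
        simp only [hx, hy, if_true, if_false, true_and]
        split_ifs <;> omega
      · simp only [hx, hy, if_false, false_and]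
        omega
    rw [Finset.sum_congr rfl (fun t _ => hpt t), Finset.sum_add_distrib]
    rw [← ih ys' (by simpa using hlen) (List.pairwise_cons.mp hsx).2 (List.pairwise_cons.mp hsy).2
        (fun v hv => hbx v (by simp [hv])) (fun v hv => hby v (by simp [hv]))]
    rw [sum_indicator_Ico lo hi y x (hby y (by simp)).1 (le_of_lt (hbx x (by simp)).2)]
    simp only [List.zip_cons_cons, List.map_cons, List.sum_cons]
    ring

-- ---------- the sweep computes the threshold sum ----------

def lastV : List (Int × Int) → Int → Int
  | [], p => p
  | e :: rest, _ => lastV rest e.1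

def tagAt (es : List (Int × Int)) (t : Int) : Int :=
  (es.map (fun e => if e.1 ≤ t then e.2 else 0)).sum

lemma lastV_ge (es : List (Int × Int)) :
    ∀ p, es.Pairwise (fun e f => e.1 ≤ f.1) → (∀ e ∈ es, p ≤ e.1) → p ≤ lastV es p := by
  induction es with
  | nil => intro p _ _; exact le_refl p
  | cons e rest ih =>
    intro p hp h
    have he : p ≤ e.1 := h e (by simp)
    have hrest : ∀ f ∈ rest, e.1 ≤ f.1 := (List.pairwise_cons.mp hp).1
    exact le_trans he (ih e.1 (List.pairwise_cons.mp hp).2 hrest)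

lemma lastV_ge_all (es : List (Int × Int)) :
    ∀ p, es.Pairwise (fun e f => e.1 ≤ f.1) → ∀ e ∈ es, e.1 ≤ lastV es p := by
  induction es with
  | nil => intro p _ e he; simp at he
  | cons e rest ih =>
    intro p hp f hf
    have hrest : ∀ g ∈ rest, e.1 ≤ g.1 := (List.pairwise_cons.mp hp).1
    have htail := (List.pairwise_cons.mp hp).2
    rcases List.mem_cons.mp hf with rfl | hf'
    · exact lastV_ge rest f.1 htail hrest
    · exact ih e.1 htail f hf'

lemma tagAt_eq_zero (es : List (Int × Int)) (t : Int) (h : ∀ e ∈ es, t < e.1) : tagAt es t = 0 := by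
  unfold tagAt
  rw [List.sum_eq_zero]
  intro z hz
  obtain ⟨e, he, rfl⟩ := List.mem_map.mp hz
  rw [if_neg (not_le.mpr (h e he))]

lemma posAreaSweep_eq (es : List (Int × Int)) :
    ∀ prev c acc, es.Pairwise (fun e f => e.1 ≤ f.1) → (∀ e ∈ es, prev ≤ e.1) →
    posAreaSweep es prev c acc
      = acc + ∑ t ∈ Finset.Ico prev (lastV es prev), max 0 (c + tagAt es t) := by
  induction es with
  | nil => intro prev c acc _ _; simp [posAreaSweep, lastV]
  | cons e rest ih =>
    intro prev c acc hp h
    obtain ⟨v, d⟩ := e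
    have hpv : prev ≤ v := h (v, d) (by simp)
    have hrest : ∀ f ∈ rest, v ≤ f.1 := by
      intro f hf; exact (List.pairwise_cons.mp hp).1 f hf
    have htail := (List.pairwise_cons.mp hp).2
    have hvl : v ≤ lastV rest v := lastV_ge rest v htail hrest
    show posAreaSweep rest v (c + d) (acc + (if c > 0 then c * (v - prev) else 0)) = _
    rw [ih v (c + d) _ htail hrest]
    have hlast : lastV ((v, d) :: rest) prev = lastV rest v := rfl
    rw [hlast]
    rw [← sum_Ico_split (fun t => max 0 (c + tagAt ((v, d) :: rest) t)) prev v (lastV rest v) hpv hvl]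
    have h1 : ∑ t ∈ Finset.Ico prev v, max 0 (c + tagAt ((v, d) :: rest) t)
        = (if c > 0 then c * (v - prev) else 0) := by
      have hz : ∀ t ∈ Finset.Ico prev v, max 0 (c + tagAt ((v, d) :: rest) t) = max 0 c := by
        intro t ht
        have htv : t < v := (Finset.mem_Ico.mp ht).2
        have h0 : tagAt ((v, d) :: rest) t = 0 := by
          apply tagAt_eq_zero
          intro f hf
          rcases List.mem_cons.mp hf with rfl | hf'
          · exact htv
          · exact lt_of_lt_of_le htv (hrest f hf')
        rw [h0, add_zero]
      rw [Finset.sum_congr rfl hz, Finset.sum_const, Int.card_Ico, nsmul_eq_mul]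
      by_cases hc : c > 0
      · rw [if_pos hc, max_eq_right (le_of_lt hc)]
        have hcast : ((v - prev).toNat : Int) = v - prev := by omega
        rw [hcast]; ring
      · rw [if_neg hc, max_eq_left (by omega)]
        ring
    have h2 : ∑ t ∈ Finset.Ico v (lastV rest v), max 0 (c + tagAt ((v, d) :: rest) t)
        = ∑ t ∈ Finset.Ico v (lastV rest v), max 0 (c + d + tagAt rest t) := by
      apply Finset.sum_congr rfl
      intro t ht
      have hvt : v ≤ t := (Finset.mem_Ico.mp ht).1
      have htag : tagAt ((v, d) :: rest) t = d + tagAt rest t := by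
        unfold tagAt
        simp [hvt]
      rw [htag, ← add_assoc]
    rw [h1, h2]
    ring

-- tagged 0/1 (resp 0/-1) sums are the CDF
lemma sum_map_tag_neg (l : List Int) (t : Int) :
    (l.map (fun v => if v ≤ t then (-1 : Int) else 0)).sum = -cdfI l t := by
  induction l with
  | nil => simp [cdfI]
  | cons v l ih => rw [List.map_cons, List.sum_cons, ih, cdfI_cons]; split_ifs <;> omega

lemma sum_map_tag_pos (l : List Int) (t : Int) :
    (l.map (fun v => if v ≤ t then (1 : Int) else 0)).sum = cdfI l t := by
  induction l with
  | nil => simp [cdfI]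
  | cons v l ih => rw [List.map_cons, List.sum_cons, ih, cdfI_cons]

lemma lastV_cases (es : List (Int × Int)) : ∀ p, lastV es p = p ∨ ∃ f ∈ es, lastV es p = f.1 := by
  induction es with
  | nil => intro p; exact Or.inl rfl
  | cons e rest ih =>
    intro p
    rcases ih e.1 with h | ⟨f, hf, h⟩
    · exact Or.inr ⟨e, by simp, h⟩
    · exact Or.inr ⟨f, by simp [hf], h⟩

-- ---------- posArea = rank-paired positive parts ----------

lemma posArea_eq_pairSum (xs ys : List Int) (lo hi : Int) :
    xs.length = ys.length →
    xs.Pairwise (· ≤ ·) → ys.Pairwise (· ≤ ·) →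
    (∀ v ∈ xs, lo ≤ v ∧ v < hi) → (∀ v ∈ ys, lo ≤ v ∧ v < hi) →
    posArea xs ys = ((xs.zip ys).map (fun e => max 0 (e.1 - e.2))).sum := by
  intro hlen hsx hsy hbx hby
  unfold posArea
  have hperm : (PySem.List.sorted
      (xs.map (fun v => (v, (-1 : Int))) ++ ys.map (fun v => (v, (1 : Int)))) (fun e => e.1) false).Perm
      (xs.map (fun v => (v, (-1 : Int))) ++ ys.map (fun v => (v, (1 : Int)))) :=
    PySem.List.sorted_perm _ _ _
  have hpw : (PySem.List.sorted
      (xs.map (fun v => (v, (-1 : Int))) ++ ys.map (fun v => (v, (1 : Int)))) (fun e => e.1) false).Pairwise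
      (fun e f => e.1 ≤ f.1) := PySem.List.sorted_pairwise _ _
  set es0 := xs.map (fun v => (v, (-1 : Int))) ++ ys.map (fun v => (v, (1 : Int))) with hes0
  -- the running tag-sum over any permutation of es0 is the CDF difference
  have htag : ∀ (l : List (Int × Int)), l.Perm es0 → ∀ t, tagAt l t = cdfI ys t - cdfI xs t := by
    intro l hl t
    have h1 : tagAt l t = tagAt es0 t := by
      unfold tagAt
      exact (hl.map _).sum_eq
    rw [h1]
    unfold tagAt
    rw [hes0, List.map_append, List.sum_append, List.map_map, List.map_map]
    rw [show ((fun (e : Int × Int) => if e.1 ≤ t then e.2 else 0) ∘ fun v => (v, (-1 : Int)))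
          = (fun v => if v ≤ t then (-1 : Int) else 0) from rfl]
    rw [show ((fun (e : Int × Int) => if e.1 ≤ t then e.2 else 0) ∘ fun v => (v, (1 : Int)))
          = (fun v => if v ≤ t then (1 : Int) else 0) from rfl]
    rw [sum_map_tag_neg, sum_map_tag_pos]
    ring
  -- membership transfer: values of the sorted event list are values of xs or ys
  have hmem : ∀ e ∈ PySem.List.sorted es0 (fun e => e.1) false, e.1 ∈ xs ∨ e.1 ∈ ys := by
    intro e he
    have : e ∈ es0 := hperm.mem_iff.mp he
    rw [hes0] at this
    rcases List.mem_append.mp this with h | h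
    · obtain ⟨v, hv, rfl⟩ := List.mem_map.mp h; exact Or.inl hv
    · obtain ⟨v, hv, rfl⟩ := List.mem_map.mp h; exact Or.inr hv
  cases hsort : PySem.List.sorted es0 (fun e => e.1) false with
  | nil =>
    have h0 : es0 = [] := (PySem.List.sorted_eq_nil_iff _ _ _).mp hsort
    rw [hes0] at h0
    have hx0 : xs = [] := by
      cases xs with
      | nil => rfl
      | cons _ _ => simp at h0
    have hy0 : ys = [] := by
      cases ys with
      | nil => rfl
      | cons _ _ => simp [hx0] at h0
    simp [hx0, hy0]
  | cons e rest =>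
    obtain ⟨v, d⟩ := e
    rw [hsort] at hperm hpw hmem
    have hrest : ∀ f ∈ rest, v ≤ f.1 := by
      intro f hf; exact (List.pairwise_cons.mp hpw).1 f hf
    have htail := (List.pairwise_cons.mp hpw).2
    show posAreaSweep rest v d 0 = _
    rw [posAreaSweep_eq rest v d 0 htail hrest, zero_add]
    set L := lastV rest v with hL
    -- on [v, L) the head tag is absorbed: integrand is tagAt of the whole event list
    have hcong : ∀ t ∈ Finset.Ico v L, max 0 (d + tagAt rest t)
        = max 0 (cdfI ys t - cdfI xs t) := by
      intro t ht
      have hvt : v ≤ t := (Finset.mem_Ico.mp ht).1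
      have : tagAt ((v, d) :: rest) t = d + tagAt rest t := by
        unfold tagAt; simp [hvt]
      rw [← this, htag _ hperm t]
    rw [Finset.sum_congr rfl hcong]
    -- bounds: v and L are values, hence inside [lo, hi)
    have hv_bound : lo ≤ v ∧ v < hi := by
      rcases hmem (v, d) (by simp) with h | h
      · exact hbx v h
      · exact hby v h
    have hL_bound : L ≤ hi := by
      have hLv : L = v ∨ ∃ f ∈ rest, L = f.1 := by
        rw [hL]; exact lastV_cases rest v
      rcases hLv with h | ⟨f, hf, h⟩
      · omega
      · rcases hmem f (by simp [hf]) with hm | hm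
        · have := (hbx f.1 hm).2; omega
        · have := (hby f.1 hm).2; omega
    -- extend the sum to [lo, hi): the integrand vanishes outside [v, L)
    have hsub : Finset.Ico v L ⊆ Finset.Ico lo hi := by
      intro t ht
      rw [Finset.mem_Ico] at *
      omega
    have hzero : ∀ t ∈ Finset.Ico lo hi, t ∉ Finset.Ico v L →
        max 0 (cdfI ys t - cdfI xs t) = 0 := by
      intro t ht hnt
      rw [Finset.mem_Ico] at ht
      have hcase : t < v ∨ L ≤ t := by
        rw [Finset.mem_Ico] at hnt; omega
      rcases hcase with hlt | hge
      · -- below the least value: both CDFs are 0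
        have hminx : ∀ w ∈ xs, t < w := by
          intro w hw
          have : (w, (-1 : Int)) ∈ es0 := by rw [hes0]; exact List.mem_append_left _ (List.mem_map.mpr ⟨w, hw, rfl⟩)
          have hin : (w, (-1 : Int)) ∈ (v, d) :: rest := hperm.mem_iff.mpr this
          rcases List.mem_cons.mp hin with h | h
          · have : w = v := congrArg Prod.fst h
            omega
          · have := hrest _ h; simp at this; omega
        have hminy : ∀ w ∈ ys, t < w := by
          intro w hw
          have : (w, (1 : Int)) ∈ es0 := by rw [hes0]; exact List.mem_append_right _ (List.mem_map.mpr ⟨w, hw, rfl⟩)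
          have hin : (w, (1 : Int)) ∈ (v, d) :: rest := hperm.mem_iff.mpr this
          rcases List.mem_cons.mp hin with h | h
          · have : w = v := congrArg Prod.fst h
            omega
          · have := hrest _ h; simp at this; omega
        rw [cdfI_eq_zero xs t hminx, cdfI_eq_zero ys t hminy]
        simp
      · -- above the greatest value: both CDFs are the (equal) lengths
        have hmax : ∀ f ∈ (v, d) :: rest, f.1 ≤ L := by
          rw [hL]
          exact lastV_ge_all ((v, d) :: rest) v hpw
        have hmaxx : ∀ w ∈ xs, w ≤ t := by
          intro w hw
          have : (w, (-1 : Int)) ∈ es0 := by rw [hes0]; exact List.mem_append_left _ (List.mem_map.mpr ⟨w, hw, rfl⟩)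
          have hin := hperm.mem_iff.mpr this
          have := hmax _ hin; simp at this; omega
        have hmaxy : ∀ w ∈ ys, w ≤ t := by
          intro w hw
          have : (w, (1 : Int)) ∈ es0 := by rw [hes0]; exact List.mem_append_right _ (List.mem_map.mpr ⟨w, hw, rfl⟩)
          have hin := hperm.mem_iff.mpr this
          have := hmax _ hin; simp at this; omega
        rw [cdfI_eq_length xs t hmaxx, cdfI_eq_length ys t hmaxy, hlen]
        simp
    rw [Finset.sum_subset hsub hzero]
    exact (pairSum_eq_threshold xs ys lo hi hlen hsx hsy hbx hby).symm

-- ---------- per-parity-class bridge: pair sums to plain sums and the sweep ----------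

lemma mod2_ne_iff (v : Int) :
    (decide (PySem.Int.mod v 2 ≠ 0)) = (decide (PySem.Int.mod v 2 = 1)) := by
  simp

lemma zip_take_right {α β : Type} (l : List α) : ∀ (l' : List β), l.zip l' = l.zip (l'.take l.length) := by
  induction l with
  | nil => intro l'; simp
  | cons x xs ih =>
    intro l'
    cases l' with
    | nil => simp
    | cons y ys => simp [ih ys]

lemma zip_reverse_eq {α β : Type} (l : List α) : ∀ (l' : List β), l.length = l'.length →
    l.reverse.zip l'.reverse = (l.zip l').reverse := by
  induction l with
  | nil => intro l' h; simp
  | cons x xs ih =>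
    intro l' h
    cases l' with
    | nil => simp at h
    | cons y ys =>
      simp only [List.length_cons] at h
      simp only [List.reverse_cons, List.zip_cons_cons]
      rw [List.zip_append (by simp; omega), ih ys (by omega)]
      simp

lemma twice_sum {α : Type} (f g : α → Int) :
    ∀ L : List α, (∀ e ∈ L, 2 * f e = g e) → 2 * (L.map f).sum = (L.map g).sum := by
  intro L
  induction L with
  | nil => intro _; simp
  | cons e t ih =>
    intro h
    simp only [List.map_cons, List.sum_cons]
    rw [mul_add, ih (fun x hx => h x (by simp [hx])), h e (by simp)]

lemma sum_map_sub {α : Type} (f g : α → Int) :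
    ∀ L : List α, (L.map (fun e => f e - g e)).sum = (L.map f).sum - (L.map g).sum := by
  intro L
  induction L with
  | nil => simp
  | cons e t ih => simp only [List.map_cons, List.sum_cons, ih]; ring

lemma class_sums (X Y : List Int) (lo hi : Int)
    (hsX : X.Pairwise (· ≤ ·)) (hsY : Y.Pairwise (· ≤ ·))
    (hbX : ∀ v ∈ X, lo ≤ v ∧ v < hi) (hbY : ∀ v ∈ Y, lo ≤ v ∧ v < hi)
    (hpar : ∀ x ∈ X, ∀ y ∈ Y, (x - y) % 2 = 0)
    (hm : X.length ≤ Y.length) :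
    2 * (((X.reverse.zip Y.reverse).map dpair).sum) = X.sum - (Y.drop (Y.length - X.length)).sum ∧
    2 * (((X.reverse.zip Y.reverse).map (fun e => max 0 (dpair e))).sum)
      = posArea X (Y.drop (Y.length - X.length)) := by
  set Y' := Y.drop (Y.length - X.length) with hY'
  have hY'len : Y'.length = X.length := by
    rw [hY', List.length_drop]; omega
  have hzipeq : X.reverse.zip Y.reverse = (X.zip Y').reverse := by
    rw [zip_take_right X.reverse Y.reverse, List.length_reverse]
    have h2 : Y.reverse.take X.length = Y'.reverse := by
      rw [hY', List.reverse_drop]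
      congr 1
      omega
    rw [h2, zip_reverse_eq X Y' hY'len.symm]
  have hY'sub : ∀ v ∈ Y', v ∈ Y := by
    intro v hv
    rw [hY'] at hv
    exact List.mem_of_mem_drop hv
  have hdd : ∀ e ∈ X.zip Y', 2 * dpair e = e.1 - e.2 := by
    intro e he
    obtain ⟨he1, he2⟩ := List.of_mem_zip he
    have hpe : (e.1 - e.2) % 2 = 0 := hpar e.1 he1 e.2 (hY'sub e.2 he2)
    have := PySem.Int.floordiv_mul_add_mod (e.1 - e.2) 2
    rw [PySem.Int.mod_eq_emod_of_pos (show (0:Int) < 2 by norm_num)] at this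
    unfold dpair
    omega
  constructor
  · rw [hzipeq, List.map_reverse, List.sum_reverse]
    rw [twice_sum dpair (fun e => e.1 - e.2) _ hdd]
    rw [show (fun (e : Int × Int) => e.1 - e.2) = (fun e => Prod.fst e - Prod.snd e) from rfl]
    rw [sum_map_sub, List.map_fst_zip (l₁ := X) (l₂ := Y') (by omega), List.map_snd_zip (l₁ := X) (l₂ := Y') (by omega)]
  · rw [hzipeq, List.map_reverse, List.sum_reverse]
    rw [twice_sum _ (fun e => max 0 (e.1 - e.2)) _ (fun e he => by have := hdd e he; show 2 * max 0 (dpair e) = max 0 (e.1 - e.2); omega)]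
    rw [posArea_eq_pairSum X Y' lo hi hY'len.symm hsX
        (hsY.sublist (List.drop_sublist _ _)) hbX (fun v hv => hbY v (hY'sub v hv))]

-- ---------- the main equivalence ----------

theorem solve_spec_aux (n : Int) (a : List Int) (b : List Int)
    (hda : ∀ v ∈ a, -2147483648 ≤ v ∧ v ≤ 2147483648)
    (hdb : ∀ v ∈ b, -2147483648 ≤ v ∧ v ≤ 2147483648)
    (hpa : n ≤ (a.length : Int)) (hpb : n ≤ (b.length : Int)) :
    solve n a b = solve_alt n a b := by
  unfold solve solve_alt
  simp only []
  set a' := PySem.List.sorted a (fun v => v) false with ha'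
  set b' := PySem.List.sorted b (fun v => v) false with hb'
  have hla : a'.length = a.length := PySem.List.length_sorted a _ _
  have hlb : b'.length = b.length := PySem.List.length_sorted b _ _
  have hk0 : (0 : Int) ≤ (if 0 < n then n else 0) := by split_ifs <;> omega
  have hkt : (if 0 < n then n else 0).toNat = n.toNat := by split_ifs <;> omega
  rw [PySem.List.slice_to _ hk0, PySem.List.slice_to _ hk0, hkt]
  have hpredne : (fun v => decide (PySem.Int.mod v 2 ≠ 0)) = (fun v => decide (PySem.Int.mod v 2 = 1)) :=
    funext mod2_ne_iff
  -- A's first loop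
  have hfold : (PySem.List.pyRange 0 n 1).foldl
      (fun (p : List Int × List Int) i =>
        let bi := PySem.List.pyGetD b' i 0
        if PySem.Int.band bi 1 ≠ 0 then (p.1 ++ [bi], p.2) else (p.1, p.2 ++ [bi])) ([], [])
      = ((b'.take n.toNat).filter (fun v => decide (PySem.Int.mod v 2 = 1)),
         (b'.take n.toNat).filter (fun v => decide (PySem.Int.mod v 2 = 0))) := by
    have hm : ((PySem.List.pyRange 0 n 1).map (fun i => PySem.List.pyGetD b' i 0)).foldl
        (fun (p : List Int × List Int) bi =>
          if PySem.Int.band bi 1 ≠ 0 then (p.1 ++ [bi], p.2) else (p.1, p.2 ++ [bi])) ([], [])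
        = ((b'.take n.toNat).filter (fun v => decide (PySem.Int.mod v 2 ≠ 0)),
           (b'.take n.toNat).filter (fun v => decide (PySem.Int.mod v 2 = 0))) := by
      rw [map_getD_pyRange_take b' n (by omega)]
      simpa using split_fold (b'.take n.toNat) [] []
    rw [List.foldl_map] at hm
    rw [hpredne] at hm
    exact hm
  simp only [hfold]
  set pa := a'.take n.toNat with hpa'
  set oa := pa.filter (fun v => decide (PySem.Int.mod v 2 = 1)) with hoa
  set ea := pa.filter (fun v => decide (PySem.Int.mod v 2 = 0)) with heaa
  set ob := (b'.take n.toNat).filter (fun v => decide (PySem.Int.mod v 2 = 1)) with hob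
  set eb := (b'.take n.toNat).filter (fun v => decide (PySem.Int.mod v 2 = 0)) with heb
  -- A's second loop: indices to values, pointers to list consumption, then the closed form
  rw [solveLoop_eq_loopVals]
  have hrange : (PySem.List.pyRange (n - 1) (-1) (-1)).map (fun i => PySem.List.pyGetD a' i 0)
      = pa.reverse := by
    rw [PySem.List.pyRange_neg_one_eq_reverse]
    simp only [List.map_reverse]
    rw [show (-1 : Int) + 1 = 0 from rfl, show n - 1 + 1 = n by ring]
    rw [hpa', map_getD_pyRange_take a' n (by omega)]
  rw [hrange]
  rw [loopVals_eq_recD ob eb _ _ _ 0 0 (by omega) (by omega)]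
  have ht1 : ((ob.length : Int) - 1 + 1).toNat = ob.length := by omega
  have ht2 : ((eb.length : Int) - 1 + 1).toNat = eb.length := by omega
  rw [ht1, ht2, List.take_length, List.take_length, recD_closed]
  simp only [List.filter_reverse, List.length_reverse, pred_eq, not_pred_eq, ← hoa, ← heaa]
  -- the -1 cases agree
  by_cases hc1 : oa.length > ob.length
  · rw [if_pos (Or.inl hc1), if_pos hc1]
  rw [if_neg hc1]
  by_cases hc0 : ea.length > eb.length
  · rw [if_pos (Or.inr hc0), if_pos hc0]
  rw [if_neg (by tauto : ¬ (oa.length > ob.length ∨ ea.length > eb.length)), if_neg hc0]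
  -- the matched-suffix slices are drops
  have hsl1 : PySem.List.slice ob (some ((ob.length : Int) - (oa.length : Int))) none
      = ob.drop (ob.length - oa.length) := by
    rw [show ((ob.length : Int) - (oa.length : Int)) = ((ob.length - oa.length : Nat) : Int) by
      omega]
    exact PySem.List.slice_from_natCast _ _
  have hsl0 : PySem.List.slice eb (some ((eb.length : Int) - (ea.length : Int))) none
      = eb.drop (eb.length - ea.length) := by
    rw [show ((eb.length : Int) - (ea.length : Int)) = ((eb.length - ea.length : Nat) : Int) by
      omega]
    exact PySem.List.slice_from_natCast _ _
  rw [hsl1, hsl0]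
  -- sortedness, bounds and parity of the four classes
  have hpaw : a'.Pairwise (· ≤ ·) := PySem.List.sorted_pairwise a (fun v => v)
  have hpbw : b'.Pairwise (· ≤ ·) := PySem.List.sorted_pairwise b (fun v => v)
  have hsoa : oa.Pairwise (· ≤ ·) :=
    List.Pairwise.sublist (List.filter_sublist.trans (List.take_sublist _ _)) hpaw
  have hsea : ea.Pairwise (· ≤ ·) :=
    List.Pairwise.sublist (List.filter_sublist.trans (List.take_sublist _ _)) hpaw
  have hsob : ob.Pairwise (· ≤ ·) :=
    List.Pairwise.sublist (List.filter_sublist.trans (List.take_sublist _ _)) hpbw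
  have hseb : eb.Pairwise (· ≤ ·) :=
    List.Pairwise.sublist (List.filter_sublist.trans (List.take_sublist _ _)) hpbw
  have hmema : ∀ {l : List Int}, l.Sublist a' → ∀ v ∈ l, (-2147483648 : Int) ≤ v ∧ v < 2147483649 := by
    intro l hl v hv
    have hv' : v ∈ a := (PySem.List.mem_sorted _ _ _ _).mp (hl.subset hv)
    have := hda v hv'
    omega
  have hmemb : ∀ {l : List Int}, l.Sublist b' → ∀ v ∈ l, (-2147483648 : Int) ≤ v ∧ v < 2147483649 := by
    intro l hl v hv
    have hv' : v ∈ b := (PySem.List.mem_sorted _ _ _ _).mp (hl.subset hv)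
    have := hdb v hv'
    omega
  have hboa := hmema (List.filter_sublist.trans (List.take_sublist _ _)) (l := oa)
  have hbea := hmema (List.filter_sublist.trans (List.take_sublist _ _)) (l := ea)
  have hbob := hmemb (List.filter_sublist.trans (List.take_sublist _ _)) (l := ob)
  have hbeb := hmemb (List.filter_sublist.trans (List.take_sublist _ _)) (l := eb)
  have hodd : ∀ {l : List Int}, l = pa.filter (fun v => decide (PySem.Int.mod v 2 = 1)) ∨
      l = (b'.take n.toNat).filter (fun v => decide (PySem.Int.mod v 2 = 1)) →
      ∀ v ∈ l, v % 2 = 1 := by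
    intro l hl v hv
    have hm : PySem.Int.mod v 2 = 1 := by
      rcases hl with rfl | rfl <;>
        simpa using (List.mem_filter.mp hv).2
    rw [PySem.Int.mod_eq_emod_of_pos (show (0:Int) < 2 by norm_num)] at hm
    exact hm
  have heven : ∀ {l : List Int}, l = pa.filter (fun v => decide (PySem.Int.mod v 2 = 0)) ∨
      l = (b'.take n.toNat).filter (fun v => decide (PySem.Int.mod v 2 = 0)) →
      ∀ v ∈ l, v % 2 = 0 := by
    intro l hl v hv
    have hm : PySem.Int.mod v 2 = 0 := by
      rcases hl with rfl | rfl <;>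
        simpa using (List.mem_filter.mp hv).2
    rw [PySem.Int.mod_eq_emod_of_pos (show (0:Int) < 2 by norm_num)] at hm
    exact hm
  have hpar1 : ∀ x ∈ oa, ∀ y ∈ ob, (x - y) % 2 = 0 := by
    intro x hx y hy
    have h1 := hodd (Or.inl hoa) x hx
    have h2 := hodd (Or.inr hob) y hy
    omega
  have hpar0 : ∀ x ∈ ea, ∀ y ∈ eb, (x - y) % 2 = 0 := by
    intro x hx y hy
    have h1 := heven (Or.inl heaa) x hx
    have h2 := heven (Or.inr heb) y hy
    omega
  obtain ⟨hsum1, harea1⟩ := class_sums oa ob (-2147483648) 2147483649 hsoa hsob hboa hbob hpar1 (by omega)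
  obtain ⟨hsum0, harea0⟩ := class_sums ea eb (-2147483648) 2147483649 hsea hseb hbea hbeb hpar0 (by omega)
  -- evaluate the pair fold and compare the two final branches
  rw [foldl_altStep_sum]
  simp only [List.map_append, List.sum_append, zero_add]
  set S1 := ((oa.reverse.zip ob.reverse).map dpair).sum with hS1
  set S0 := ((ea.reverse.zip eb.reverse).map dpair).sum with hS0
  set M1 := ((oa.reverse.zip ob.reverse).map (fun e => max 0 (dpair e))).sum with hM1
  set M0 := ((ea.reverse.zip eb.reverse).map (fun e => max 0 (dpair e))).sum with hM0
  by_cases hz : S1 + S0 = 0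
  · rw [if_pos hz]
    have hdz : ¬ ((oa.sum - (ob.drop (ob.length - oa.length)).sum)
        + (ea.sum - (eb.drop (eb.length - ea.length)).sum) ≠ 0) := by omega
    rw [if_neg hdz]
    rw [PySem.Int.floordiv_eq_ediv_of_pos (show (0:Int) < 2 by norm_num)]
    omega
  · rw [if_neg hz]
    have hdz : ((oa.sum - (ob.drop (ob.length - oa.length)).sum)
        + (ea.sum - (eb.drop (eb.length - ea.length)).sum) ≠ 0) := by omega
    rw [if_pos hdz]

-- ===== VERDICT (by name: the statement is the Claim_ definition above) =====
theorem solve_spec : Claim_equal_solve := by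
  intro n a b hdom hpre
  unfold Spec_solve
  unfold Dom_solve at hdom
  simp only [Bool.and_eq_true, List.all_eq_true, pvDomInt, decide_eq_true_eq] at hdom
  exact solve_spec_aux n a b (fun v hv => (hdom.1.2 v hv)) (fun v hv => (hdom.2 v hv)) hpre.1 hpre.2
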